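-- pv_equiv track=rewrite | github.com/alchupin/leetcode | yandex_algorithm_training/sets/words_in_text.py | words_in_text
-- ===== SOURCE A (Python) =====
-- def words_in_text(dictionary, text):
--     extended_dict = set(dictionary)
--     result = []
--     for word in dictionary:
--         for pos_to_del in range(len(word)):
--             extended_dict.add(word[:pos_to_del] + word[pos_to_del+1:])
--     for word in text.split():
--         if word in extended_dict:
--             result.append(word)
--     return result
--
-- text = 'The dg flys away. elephan lives in Africa.'
-- ===== SOURCE B (Python) =====
-- def _is_subseq(w, d):
--     i = 0
--     for ch in d:
--         if i < len(w) and w[i] == ch: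
--             i += 1
--     return i == len(w)
--
-- def words_in_text(dictionary, text):
--     dict_words = set(dictionary)
--     result = []
--     for w in text.split():
--         if w in dict_words or any(
--                 len(d) == len(w) + 1 and _is_subseq(w, d) for d in dictionary):
--             result.append(w)
--     return result
-- ===== Notes on version B (the rewrite author's own statement) =====
-- stated objective: alternative
-- what changed: A materialises the expanded dictionary (every word plus every one-deletion variant) as a set and filters the text against it; B never builds any variant string: for each text word it checks direct membership in the dictionary set, or runs a two-pointer greedy subsequence scan against each dictionary word exactly one character longer (w is a one-deletion of d iff len(d)=len(w)+1 and w is a subsequence of d), avoiding construction and hashing of the O(sum len(d)^2) variant strings.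
import Mathlib
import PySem

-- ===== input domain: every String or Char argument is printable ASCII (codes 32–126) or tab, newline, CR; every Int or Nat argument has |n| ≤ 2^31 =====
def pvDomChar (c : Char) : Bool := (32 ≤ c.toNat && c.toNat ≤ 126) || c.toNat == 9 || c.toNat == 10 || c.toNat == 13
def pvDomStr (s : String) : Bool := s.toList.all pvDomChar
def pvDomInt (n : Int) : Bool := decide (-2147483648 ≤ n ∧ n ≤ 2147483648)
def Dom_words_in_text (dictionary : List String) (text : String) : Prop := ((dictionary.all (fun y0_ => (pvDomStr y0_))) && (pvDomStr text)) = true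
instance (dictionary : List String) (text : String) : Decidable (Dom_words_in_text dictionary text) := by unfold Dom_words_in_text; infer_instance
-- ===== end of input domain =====

-- B builds no variant strings at all: a text word matches iff it is in the dictionary or is a
-- subsequence (greedy two-pointer scan) of a dictionary word exactly one character longer (alternative algorithm).

-- ===== PORT A =====
-- word[:pos] + word[pos+1:]  (string slicing ported through toList, exact)
def pvDelVariant (word : String) (pos : Int) : String :=
  String.ofList (PySem.List.slice word.toList none (some pos) ++
                 PySem.List.slice word.toList (some (pos + 1)) none)

def words_in_text (dictionary : List String) (text : String) : List String :=
  let extended_dict :=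
    dictionary.foldl (fun s word =>
      (PySem.List.pyRange 0 (PySem.Str.len word) 1).foldl
        (fun s pos => PySem.Set.add s (pvDelVariant word pos)) s)
      (PySem.Set.ofList dictionary)
  (PySem.Str.split₀ text).foldl
    (fun result word => if PySem.Set.contains extended_dict word then result ++ [word] else result) []

-- ===== PORT B =====
-- _is_subseq(w, d): two-pointer greedy scan; 'w[i]? = some ch' is exactly 'i < len(w) and w[i] == ch'
def pvScan (w d : List Char) : Nat :=
  d.foldl (fun i ch => if w[i]? = some ch then i + 1 else i) 0

def words_in_text_alt (dictionary : List String) (text : String) : List String :=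
  let dict_words := PySem.Set.ofList dictionary
  (PySem.Str.split₀ text).foldl
    (fun result w =>
      if PySem.Set.contains dict_words w ||
         dictionary.any (fun d =>
           (PySem.Str.len d == PySem.Str.len w + 1) &&
           (pvScan w.toList d.toList == w.toList.length))
      then result ++ [w] else result) []

-- ===== PRECONDITION & SPEC =====
def Spec_words_in_text (dictionary : List String) (text : String) (out : List String) : Prop := out = words_in_text_alt dictionary text
instance (dictionary : List String) (text : String) (out : List String) : Decidable (Spec_words_in_text dictionary text out) := by unfold Spec_words_in_text; infer_instance

-- ===== CLAIM (what is proved, stated in full; the proofs are below) =====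
def Claim_equal_words_in_text : Prop := ∀ (dictionary : List String) (text : String), Dom_words_in_text dictionary text → Spec_words_in_text dictionary text (words_in_text dictionary text)

-- ===== LEMMAS AND PROOFS =====

-- membership after an unconditional Set.add fold
lemma mem_foldl_add {x : String} (cs : List String) (s : PySem.Set String) :
    x ∈ cs.foldl PySem.Set.add s ↔ x ∈ s ∨ x ∈ cs := by
  induction cs generalizing s with
  | nil => simp
  | cons c cs ih => simp [ih, PySem.Set.mem_add]; tauto

-- A's inner loop adds, for each position, the deletion variant
lemma inner_eq (w : String) (s : PySem.Set String) :
    (PySem.List.pyRange 0 (PySem.Str.len w) 1).foldl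
        (fun s pos => PySem.Set.add s (pvDelVariant w pos)) s =
      ((PySem.List.pyRange 0 (PySem.Str.len w) 1).map (pvDelVariant w)).foldl PySem.Set.add s := by
  rw [List.foldl_map]

-- membership in A's extended_dict fold
lemma mem_extended {x : String} (dict : List String) (s : PySem.Set String) :
    x ∈ dict.foldl (fun s word =>
        (PySem.List.pyRange 0 (PySem.Str.len word) 1).foldl
          (fun s pos => PySem.Set.add s (pvDelVariant word pos)) s) s ↔
      x ∈ s ∨ ∃ w ∈ dict, ∃ i ∈ PySem.List.pyRange 0 (PySem.Str.len w) 1, pvDelVariant w i = x := by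
  induction dict generalizing s with
  | nil => simp
  | cons d ds ih =>
    rw [List.foldl_cons, ih, inner_eq, mem_foldl_add]
    simp only [List.exists_mem_cons_iff, List.mem_map]
    constructor
    · rintro ((h | h) | h)
      · exact Or.inl h
      · exact Or.inr (Or.inl h)
      · exact Or.inr (Or.inr h)
    · rintro (h | (h | h))
      · exact Or.inl (Or.inl h)
      · exact Or.inl (Or.inr h)
      · exact Or.inr h

-- recursive reference form of the greedy scan
def pvScanRec : List Char → List Char → Nat
  | _, [] => 0
  | [], _ :: d => pvScanRec [] d
  | a :: as, c :: d => if a = c then pvScanRec as d + 1 else pvScanRec (a :: as) d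

lemma scanRec_nil (d : List Char) : pvScanRec [] d = 0 := by
  induction d with
  | nil => rfl
  | cons c d ih => simpa [pvScanRec] using ih

lemma foldl_scan (d : List Char) : ∀ (w : List Char) (i : Nat), i ≤ w.length →
    d.foldl (fun i ch => if w[i]? = some ch then i + 1 else i) i = i + pvScanRec (w.drop i) d := by
  induction d with
  | nil => intro w i _; simp [pvScanRec]
  | cons c d ih =>
    intro w i hi
    rcases lt_or_eq_of_le hi with hlt | heq
    · have hdrop : w.drop i = w[i] :: w.drop (i + 1) := (List.getElem_cons_drop hlt).symm
      by_cases hc : w[i] = c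
      · have : w[i]? = some c := by rw [List.getElem?_eq_getElem hlt, hc]
        rw [List.foldl_cons]
        simp only [this, reduceIte]
        rw [ih w (i + 1) (by omega), hdrop]
        simp [pvScanRec, hc]
        omega
      · have : ¬ (w[i]? = some c) := by
          rw [List.getElem?_eq_getElem hlt]; simpa using hc
        rw [List.foldl_cons]
        rw [if_neg this]
        rw [ih w i hi, hdrop]
        simp [pvScanRec, hc, ← hdrop]
    · have hnone : w[i]? = none := List.getElem?_eq_none (by omega)
      have hdrop : w.drop i = [] := List.drop_eq_nil_of_le (by omega)
      rw [List.foldl_cons]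
      simp only [hnone, reduceCtorEq, if_false]
      rw [ih w i hi, hdrop]
      simp [pvScanRec, scanRec_nil]

lemma pvScan_eq (w d : List Char) : pvScan w d = pvScanRec w d := by
  simpa using foldl_scan d w 0 (by omega)

lemma scanRec_eq_iff (d : List Char) : ∀ w : List Char, pvScanRec w d = w.length ↔ w.Sublist d := by
  induction d with
  | nil =>
    intro w
    cases w <;> simp [pvScanRec]
  | cons c d ih =>
    intro w
    cases w with
    | nil => simp [scanRec_nil]
    | cons a as =>
      by_cases hc : a = c
      · subst hc
        simp [pvScanRec, ih, List.cons_sublist_cons]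
      · simp only [pvScanRec, if_neg hc, ih]
        constructor
        · intro h; exact h.cons c
        · intro h
          cases h with
          | cons _ h => exact h
          | cons₂ => exact absurd rfl hc

-- one-deletion characterisation: m is l with one element erased iff lengths differ by 1 and m <+ l
lemma erase_exists (l : List Char) : ∀ m : List Char,
    (∃ k, k < l.length ∧ l.eraseIdx k = m) ↔ l.length = m.length + 1 ∧ m.Sublist l := by
  induction l with
  | nil => intro m; simp
  | cons a l ih =>
    intro m
    constructor
    · rintro ⟨k, hk, rfl⟩
      refine ⟨?_, List.eraseIdx_sublist _ _⟩
      rw [List.length_eraseIdx, if_pos hk]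
      simp at hk ⊢
    · rintro ⟨hlen, hsub⟩
      rcases List.sublist_cons_iff.mp hsub with h | ⟨m', rfl, h⟩
      · have : m = l := h.eq_of_length (by simp at hlen; omega)
        exact ⟨0, by simp, by simpa [List.eraseIdx] using this.symm⟩
      · obtain ⟨k, hk, hek⟩ := (ih m').mpr ⟨by simp at hlen; omega, h⟩
        exact ⟨k + 1, by simpa using hk, by simpa [List.eraseIdx] using hek⟩

-- the two per-dictionary-word tests agree
lemma variant_iff (d w : String) :
    (∃ i ∈ PySem.List.pyRange 0 (PySem.Str.len d) 1, pvDelVariant d i = w) ↔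
      (PySem.Str.len d = PySem.Str.len w + 1 ∧ pvScan w.toList d.toList = w.toList.length) := by
  have hlen : ∀ s : String, PySem.Str.len s = (s.toList.length : Int) := by
    intro s; simp [PySem.Str.len_eq]
  rw [pvScan_eq, scanRec_eq_iff]
  constructor
  · rintro ⟨i, hi, rfl⟩
    rw [PySem.List.mem_pyRange_one] at hi
    obtain ⟨h0, hlt⟩ := hi
    rw [hlen d] at hlt
    have hk : i.toNat < d.toList.length := by omega
    have h1 : (i + 1).toNat = i.toNat + 1 := by omega
    have hv : (pvDelVariant d i).toList = d.toList.eraseIdx i.toNat := by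
      unfold pvDelVariant
      rw [PySem.List.slice_to _ h0, PySem.List.slice_from _ (by omega), h1,
        List.eraseIdx_eq_take_drop_succ]
      simp
    have := (erase_exists d.toList _).mp ⟨i.toNat, hk, hv.symm⟩
    rw [hlen d, hlen (pvDelVariant d i), this.1]
    exact ⟨by push_cast; ring, this.2⟩
  · rintro ⟨h1, h2⟩
    rw [hlen d, hlen w] at h1
    obtain ⟨k, hk, hek⟩ := (erase_exists d.toList w.toList).mpr ⟨by omega, h2⟩
    refine ⟨(k : Int), ?_, ?_⟩
    · rw [PySem.List.mem_pyRange_one, hlen d]; omega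
    · unfold pvDelVariant
      have : ((k : Int) + 1) = ((k + 1 : Nat) : Int) := by push_cast; ring
      rw [PySem.List.slice_to_natCast, this, PySem.List.slice_from_natCast,
        ← List.eraseIdx_eq_take_drop_succ, hek]
      exact String.ofList_toList

-- ===== VERDICT (by name: the statement is the Claim_ definition above) =====
theorem words_in_text_spec : Claim_equal_words_in_text := by
  intro dictionary text _
  unfold Spec_words_in_text words_in_text words_in_text_alt
  dsimp only
  rw [PySem.List.foldl_append_if (f := fun w => w), PySem.List.foldl_append_if (f := fun w => w)]
  simp only [List.map_id_fun', id_eq, List.nil_append]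
  apply List.filter_congr
  intro w _
  rw [Bool.eq_iff_iff, PySem.Set.contains_iff, Bool.or_eq_true, PySem.Set.contains_iff]
  rw [mem_extended]
  simp only [PySem.Set.mem_ofList, List.any_eq_true, Bool.and_eq_true, beq_iff_eq]
  constructor
  · rintro (h | ⟨d, hd, hv⟩)
    · exact Or.inl h
    · exact Or.inr ⟨d, hd, (variant_iff d w).mp hv⟩
  · rintro (h | ⟨d, hd, hv⟩)
    · exact Or.inl h
    · exact Or.inr ⟨d, hd, (variant_iff d w).mpr hv⟩
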